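-- pv_equiv track=rewrite | github.com/2149-SRUTHI-S/Turing-Machine-Simulator | Turing_Machine Simulator/main.py | accepts_even_ones_odd_zeros
-- ===== SOURCE A (Python) =====
-- def accepts_even_ones_odd_zeros(string):
-- 	state = 0
-- 	for symbol in string:
-- 		if state == 0:
-- 			if symbol == '0':
-- 				state = 2
-- 			elif symbol == '1':
-- 				state = 1
-- 			else:
-- 				return False
-- 		elif state == 1:
-- 			if symbol == '0':
-- 				state = 3
-- 			elif symbol == '1':
-- 				state = 0
-- 			else:
-- 				return False
-- 		elif state == 2:
-- 			if symbol == '0':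
-- 				state = 0
-- 			elif symbol == '1':
-- 				state = 3
-- 			else:
-- 				return False
-- 		elif state == 3:
-- 			if symbol == '0':
-- 				state = 1
-- 			elif symbol == '1':
-- 				state = 2
-- 			else:
-- 				return False
-- 	return state == 2
-- ===== SOURCE B (Python) =====
-- def accepts_even_ones_odd_zeros(string):
--     ones = 0
--     zeros = 0
--     for symbol in string:
--         if symbol == '0':
--             zeros += 1
--         elif symbol == '1':
--             ones += 1
--         else:
--             return False
--     return ones % 2 == 0 and zeros % 2 == 1
-- ===== Notes on version B (the rewrite author's own statement) =====
-- stated objective: simpler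
-- what changed: Replaced the 4-state hand-coded DFA transition table with two symbol counters and a single parity check (ones even and zeros odd) after the loop.
import Mathlib
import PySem

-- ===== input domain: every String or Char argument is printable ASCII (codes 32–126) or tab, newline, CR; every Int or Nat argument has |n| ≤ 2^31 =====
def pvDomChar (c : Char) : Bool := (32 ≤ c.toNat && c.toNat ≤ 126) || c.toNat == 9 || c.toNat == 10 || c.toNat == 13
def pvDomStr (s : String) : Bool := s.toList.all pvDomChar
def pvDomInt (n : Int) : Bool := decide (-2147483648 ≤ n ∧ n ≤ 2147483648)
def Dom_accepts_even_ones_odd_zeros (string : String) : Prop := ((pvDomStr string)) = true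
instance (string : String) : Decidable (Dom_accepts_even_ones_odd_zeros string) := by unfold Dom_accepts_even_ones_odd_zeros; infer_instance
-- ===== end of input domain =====

-- B replaces A's 4-state DFA transition table with two counters and one parity check at the end (simpler).

-- ===== PORT A =====
-- the for-loop with early 'return False': structural recursion threading the DFA state
def pvALoop (state : Int) : List Char → Bool
  | [] => state == 2
  | c :: cs =>
    if state == 0 then
      if c == '0' then pvALoop 2 cs
      else if c == '1' then pvALoop 1 cs
      else false
    else if state == 1 then
      if c == '0' then pvALoop 3 cs
      else if c == '1' then pvALoop 0 cs
      else false
    else if state == 2 then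
      if c == '0' then pvALoop 0 cs
      else if c == '1' then pvALoop 3 cs
      else false
    else if state == 3 then
      if c == '0' then pvALoop 1 cs
      else if c == '1' then pvALoop 2 cs
      else false
    else pvALoop state cs  -- Python: no branch fires, state unchanged (unreachable from state 0)

def accepts_even_ones_odd_zeros (string : String) : Bool :=
  pvALoop 0 string.toList

-- ===== PORT B =====
-- the counting loop with early 'return False'
def pvBLoop (ones zeros : Int) : List Char → Bool
  | [] => (PySem.Int.mod ones 2 == 0) && (PySem.Int.mod zeros 2 == 1)
  | c :: cs =>
    if c == '0' then pvBLoop ones (zeros + 1) cs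
    else if c == '1' then pvBLoop (ones + 1) zeros cs
    else false

def accepts_even_ones_odd_zeros_alt (string : String) : Bool :=
  pvBLoop 0 0 string.toList

-- ===== PRECONDITION & SPEC =====
def Spec_accepts_even_ones_odd_zeros (string : String) (out : Bool) : Prop := out = accepts_even_ones_odd_zeros_alt string
instance (string : String) (out : Bool) : Decidable (Spec_accepts_even_ones_odd_zeros string out) := by unfold Spec_accepts_even_ones_odd_zeros; infer_instance

-- ===== CLAIM (what is proved, stated in full; the proofs are below) =====
def Claim_equal_accepts_even_ones_odd_zeros : Prop := ∀ (string : String), Dom_accepts_even_ones_odd_zeros string → Spec_accepts_even_ones_odd_zeros string (accepts_even_ones_odd_zeros string)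

-- ===== LEMMAS AND PROOFS =====

-- invariant: A's state encodes the two parities, state = ones%2 + 2*(zeros%2)
theorem pvLoop_eq (cs : List Char) : ∀ (o z : Int),
    pvALoop (o % 2 + 2 * (z % 2)) cs = pvBLoop o z cs := by
  induction cs with
  | nil =>
    intro o z
    have ho := Int.emod_two_eq o
    have hz := Int.emod_two_eq z
    simp only [pvALoop, pvBLoop, PySem.Int.mod_eq_emod_of_pos (show (0:Int) < 2 by norm_num)]
    rcases ho with ho | ho <;> rcases hz with hz | hz <;> rw [ho, hz] <;> decide
  | cons c cs ih =>
    intro o z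
    have ho := Int.emod_two_eq o
    have hz := Int.emod_two_eq z
    rcases ho with ho | ho <;> rcases hz with hz | hz <;>
      simp only [pvALoop, pvBLoop, ho, hz] <;> norm_num <;>
      split_ifs <;>
      first
        | rfl
        | (rw [← ih]; congr 2; omega)

-- ===== VERDICT (by name: the statement is the Claim_ definition above) =====
theorem accepts_even_ones_odd_zeros_spec : Claim_equal_accepts_even_ones_odd_zeros := by
  intro s _
  unfold Spec_accepts_even_ones_odd_zeros accepts_even_ones_odd_zeros accepts_even_ones_odd_zeros_alt
  have h := pvLoop_eq s.toList 0 0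
  simpa using h
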